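-- pv_equiv track=rewrite | github.com/pypi-data/pypi-mirror-99 | packages/entangld/entangld-1.0.0.tar.gz/entangld-1.0.0/entangld/entangld.py | _is_beneath
-- ===== SOURCE A (Python) =====
-- def _is_beneath(a, b):
--     """Is 'a' beneath 'b'?
--
--     Args:
--         a : string (path)
--         b : string (path)
--
--     Returns:
--         bool: True if a is beneath (or equal to) b
--     """
--
--     # Everything is beneath the top ("")
--     if (b==""):
--         return True
--
--     # If paths are both blank, they are equal
--     if (b=="" and a==""):
--         return True
--
--     A = a.split(".")
--     B = b.split(".")
--
--     # A is not beneath B if any part is not the same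
--     while (len(A) > 0 and len(B) > 0):
--         if (A.pop(0) != B.pop(0)):
--             return False
--
--     # A is not beneath B if B is longer
--     if (len(B) > 0):
--         return False
--
--     return True
-- ===== SOURCE B (Python) =====
-- def _is_beneath(a, b):
--     """Is 'a' beneath 'b'? (string-prefix formulation, no splitting/loop)"""
--     # Everything is beneath the top ("")
--     if b == "":
--         return True
--     # a is beneath b iff it equals b or extends it at a component boundary
--     return a == b or a.startswith(b + ".")
-- ===== Notes on version B (the rewrite author's own statement) =====
-- stated objective: idiomatic
-- what changed: Replaces splitting both paths into component lists and consuming them pairwise with pop(0) in a while loop by a single string comparison: a == b or a.startswith(b + '.'), where the trailing '.' enforces the component boundary.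
import Mathlib
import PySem

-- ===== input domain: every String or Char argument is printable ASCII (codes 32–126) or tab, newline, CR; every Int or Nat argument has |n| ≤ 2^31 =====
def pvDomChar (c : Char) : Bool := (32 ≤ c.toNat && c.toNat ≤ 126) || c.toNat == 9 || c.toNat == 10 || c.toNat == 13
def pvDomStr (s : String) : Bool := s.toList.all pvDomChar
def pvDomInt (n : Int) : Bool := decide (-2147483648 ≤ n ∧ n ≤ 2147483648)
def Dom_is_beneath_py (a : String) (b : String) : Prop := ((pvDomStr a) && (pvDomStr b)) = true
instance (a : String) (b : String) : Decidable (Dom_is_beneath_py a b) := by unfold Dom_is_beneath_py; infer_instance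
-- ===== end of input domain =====

-- B replaces A's split-into-components-and-pop loop by a direct string-prefix test (idiomatic, no loop).

-- ===== PORT A =====
-- the while loop: pop the first component of each list while both are nonempty,
-- return False on a mismatch; afterwards False iff B-components remain
def abLoop : List (List Char) → List (List Char) → Bool
  | x :: X, y :: Y => if x ≠ y then false else abLoop X Y
  | _, B => !(decide (B.length > 0))

def is_beneath_py (a : String) (b : String) : Bool :=
  if b == "" then true
  else if b == "" && a == "" then true
  else abLoop (PySem.Chars.splitOn a.toList ".".toList) (PySem.Chars.splitOn b.toList ".".toList)

-- ===== PORT B =====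
def is_beneath_py_alt (a : String) (b : String) : Bool :=
  if b == "" then true
  else a == b || PySem.Str.startswith a (b ++ ".")

-- ===== PRECONDITION & SPEC =====
def Spec_is_beneath_py (a : String) (b : String) (out : Bool) : Prop := out = is_beneath_py_alt a b
instance (a : String) (b : String) (out : Bool) : Decidable (Spec_is_beneath_py a b out) := by unfold Spec_is_beneath_py; infer_instance

-- ===== CLAIM (what is proved, stated in full; the proofs are below) =====
def Claim_equal_is_beneath_py : Prop := ∀ (a : String) (b : String), Dom_is_beneath_py a b → Spec_is_beneath_py a b (is_beneath_py a b)

-- ===== LEMMAS AND PROOFS =====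

-- simple model of s.split(".")
def fsplit : List Char → List (List Char)
  | [] => [[]]
  | c :: rest => if c = '.' then [] :: fsplit rest else (fsplit rest).modifyHead (c :: ·)

theorem fsplit_ne_nil (l : List Char) : fsplit l ≠ [] := by
  cases l with
  | nil => simp [fsplit]
  | cons c rest =>
    simp only [fsplit]
    split_ifs
    · simp
    · cases h : fsplit rest with
      | nil => exact absurd h (fsplit_ne_nil rest)
      | cons a t => simp [List.modifyHead]

theorem modifyHead_id' (l : List (List Char)) : List.modifyHead (fun x => x) l = l := by
  cases l <;> simp [List.modifyHead]

theorem splitOn_go_eq (fuel : Nat) : ∀ (l cur : List Char) (acc : List (List Char)),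
    l.length < fuel →
    PySem.Chars.splitOn.go ['.'] fuel l cur acc
      = acc.reverse ++ (fsplit l).modifyHead (cur.reverse ++ ·) := by
  induction fuel with
  | zero => intro l cur acc h; omega
  | succ n ih =>
    intro l cur acc h
    cases l with
    | nil => simp [PySem.Chars.splitOn.go, fsplit]
    | cons c rest =>
      by_cases hc : c = '.'
      · subst hc
        rw [show PySem.Chars.splitOn.go ['.'] (n+1) ('.' :: rest) cur acc
              = PySem.Chars.splitOn.go ['.'] n rest [] (cur.reverse :: acc) by
            simp [PySem.Chars.splitOn.go, List.isPrefixOf]]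
        rw [ih rest [] (cur.reverse :: acc) (by simpa using Nat.lt_of_succ_lt_succ h)]
        simp [fsplit, modifyHead_id']
      · have hc' : ¬ ('.' = c) := fun h => hc h.symm
        rw [show PySem.Chars.splitOn.go ['.'] (n+1) (c :: rest) cur acc
              = PySem.Chars.splitOn.go ['.'] n rest (c :: cur) acc by
            simp [PySem.Chars.splitOn.go, List.isPrefixOf, hc']]
        rw [ih rest (c :: cur) acc (by simpa using Nat.lt_of_succ_lt_succ h)]
        simp only [fsplit, if_neg hc]
        cases hfr : fsplit rest with
        | nil => exact absurd hfr (fsplit_ne_nil rest)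
        | cons a t => simp [List.modifyHead]

theorem splitOn_eq_fsplit (l : List Char) : PySem.Chars.splitOn l ['.'] = fsplit l := by
  have := splitOn_go_eq (l.length + 1) l [] [] (by omega)
  simpa [PySem.Chars.splitOn, modifyHead_id'] using this

theorem abLoop_eq_prefix (X : List (List Char)) : ∀ Y, abLoop X Y = decide (Y <+: X) := by
  induction X with
  | nil =>
    intro Y; cases Y with
    | nil => simp [abLoop]
    | cons y Y => simp [abLoop]
  | cons x X ih =>
    intro Y; cases Y with
    | nil => simp [abLoop]
    | cons y Y =>
      by_cases hxy : x = y
      · subst hxy; simp [abLoop, ih, List.cons_prefix_cons]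
      · simp [abLoop, hxy, List.cons_prefix_cons, Ne.symm hxy]

theorem fsplit_dot (l : List Char) : fsplit ('.' :: l) = [] :: fsplit l := by
  simp [fsplit]

theorem fsplit_cons (c : Char) (l : List Char) (hc : c ≠ '.') :
    ∃ h t, fsplit l = h :: t ∧ fsplit (c :: l) = (c :: h) :: t := by
  cases hl : fsplit l with
  | nil => exact absurd hl (fsplit_ne_nil l)
  | cons h t => exact ⟨h, t, rfl, by simp [fsplit, hc, hl, List.modifyHead]⟩

theorem fsplit_prefix_iff (x : List Char) : ∀ y : List Char,
    fsplit y <+: fsplit x ↔ (x = y ∨ (y ++ ['.']) <+: x) := by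
  induction x with
  | nil =>
    intro y
    cases y with
    | nil => simp
    | cons c y' =>
      constructor
      · intro hpre
        exfalso
        by_cases hc : c = '.'
        · subst hc
          rw [fsplit_dot] at hpre
          rcases hpre with ⟨t, ht⟩
          simp [fsplit] at ht
          exact fsplit_ne_nil y' ht.1
        · rcases fsplit_cons c y' hc with ⟨h, t, -, he⟩
          rw [he] at hpre
          rcases hpre with ⟨u, hu⟩
          simp [fsplit] at hu
      · rintro (h | h)
        · exact absurd h (by simp)
        · rcases h with ⟨u, hu⟩
          simp at hu
  | cons c x' ih =>
    intro y
    cases y with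
    | nil =>
      constructor
      · intro hpre
        by_cases hc : c = '.'
        · subst hc
          right
          exact ⟨x', by simp⟩
        · exfalso
          rcases fsplit_cons c x' hc with ⟨h, t, -, he⟩
          rw [he] at hpre
          rcases hpre with ⟨u, hu⟩
          simp [fsplit] at hu
      · rintro (h | h)
        · exact absurd h (by simp)
        · rcases h with ⟨t, ht⟩
          simp at ht
          rw [← ht.1, fsplit_dot]
          simp [fsplit, List.cons_prefix_cons]
    | cons d y' =>
      by_cases hcd : c = d
      · subst hcd
        by_cases hc : c = '.'
        · subst hc
          rw [fsplit_dot, fsplit_dot, List.cons_prefix_cons]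
          simp only [true_and]
          rw [ih y']
          constructor
          · rintro (h | ⟨t, ht⟩)
            · left; rw [h]
            · right; exact ⟨t, by simp [ht]⟩
          · rintro (h | ⟨t, ht⟩)
            · left; exact (List.cons.injEq _ _ _ _ ▸ h).2
            · right
              exact ⟨t, by simpa using ht⟩
        · rcases fsplit_cons c x' hc with ⟨hx, tx, hfx, hex⟩
          rcases fsplit_cons c y' hc with ⟨hy, ty, hfy, hey⟩
          rw [hex, hey, List.cons_prefix_cons]
          have hih := ih y'
          rw [hfx, hfy, List.cons_prefix_cons] at hih
          constructor
          · rintro ⟨h1, h2⟩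
            have h1' : hy = hx := by simpa using h1
            rcases hih.mp ⟨h1'.symm ▸ rfl, h2⟩ with h | ⟨u, hu⟩
            · left; rw [h]
            · right; exact ⟨u, by simpa using hu⟩
          · rintro (h | ⟨u, hu⟩)
            · have hx' : x' = y' := (List.cons.injEq _ _ _ _ ▸ h).2
              subst hx'
              rw [hfx] at hfy
              exact ⟨by simp [(List.cons.injEq _ _ _ _ ▸ hfy).1], (List.cons.injEq _ _ _ _ ▸ hfy).2 ▸ List.prefix_rfl⟩
            · rcases hih.mpr (Or.inr ⟨u, by simpa using hu⟩) with ⟨h1, h2⟩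
              exact ⟨by simp [h1], h2⟩
      · -- heads differ: both sides are false
        have rhsF : ¬ (c :: x' = d :: y' ∨ (d :: y' ++ ['.']) <+: c :: x') := by
          rintro (h | ⟨u, hu⟩)
          · exact hcd (List.cons.injEq _ _ _ _ ▸ h).1
          · simp at hu
            exact hcd hu.1.symm
        constructor
        · intro hpre
          exfalso
          by_cases hc : c = '.'
          · subst hc
            have hd : d ≠ '.' := fun h => hcd h.symm
            rcases fsplit_cons d y' hd with ⟨h, t, -, he⟩
            rw [he, fsplit_dot, List.cons_prefix_cons] at hpre
            simp at hpre
          · by_cases hd : d = '.'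
            · subst hd
              rcases fsplit_cons c x' hc with ⟨h, t, -, he⟩
              rw [he, fsplit_dot, List.cons_prefix_cons] at hpre
              simp at hpre
            · rcases fsplit_cons c x' hc with ⟨hx, tx, -, hex⟩
              rcases fsplit_cons d y' hd with ⟨hy, ty, -, hey⟩
              rw [hex, hey, List.cons_prefix_cons] at hpre
              simp at hpre
              exact hcd hpre.1.1.symm
        · intro h
          exact absurd h rhsF

theorem main_eq (a b : String) (hb : ¬ b = "") :
    abLoop (PySem.Chars.splitOn a.toList ".".toList) (PySem.Chars.splitOn b.toList ".".toList)
      = (a == b || PySem.Str.startswith a (b ++ ".")) := by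
  have hlist : ".".toList = ['.'] := rfl
  rw [hlist, splitOn_eq_fsplit, splitOn_eq_fsplit, abLoop_eq_prefix]
  rw [show (decide (fsplit b.toList <+: fsplit a.toList))
        = decide (a.toList = b.toList ∨ (b.toList ++ ['.']) <+: a.toList) from
      decide_eq_decide.mpr (fsplit_prefix_iff _ _)]
  have htl : (b ++ ".").toList = b.toList ++ ['.'] := by simp
  have hsw : PySem.Str.startswith a (b ++ ".") = decide ((b.toList ++ ['.']) <+: a.toList) := by
    rw [PySem.Str.startswith_eq, htl]
    simp only [PySem.Chars.startswith]
    rw [Bool.eq_iff_iff]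
    simp [List.isPrefixOf_iff_prefix]
  have hab : (a == b) = decide (a.toList = b.toList) := by
    by_cases h : a = b
    · subst h; simp
    · have h' : a.toList ≠ b.toList := fun hh => h (String.ext hh)
      simp [h, h']
  rw [hsw, hab, Bool.decide_or]

-- ===== VERDICT (by name: the statement is the Claim_ definition above) =====
theorem is_beneath_py_spec : Claim_equal_is_beneath_py := by
  intro a b _
  unfold Spec_is_beneath_py is_beneath_py is_beneath_py_alt
  by_cases hb : b = ""
  · simp [hb]
  · simp only [beq_iff_eq, if_neg hb, Bool.and_eq_true]
    rw [main_eq a b hb]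
    simp [hb]
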